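-- pv_equiv track=rewrite | github.com/Bcontrerascoloma/Intro_Progra | scripts/thanos.py | esThanos
-- ===== SOURCE A (Python) =====
-- def esThanos(n, pos=1,impar=0,par=0):
--     if n == 0:
--         return impar == par
--     digito = n%10
--     if pos%2 == 1:#impar
--         impar = digito + impar
--     else:
--         par = par + digito
--     return esThanos(n//10,pos +1, impar,par)
-- ===== SOURCE B (Python) =====
-- def esThanos(n, pos=1, impar=0, par=0):
--     # single difference accumulator with an alternating sign instead of
--     # two sums and a position counter
--     diff = impar - par
--     sign = 1 if pos % 2 == 1 else -1
--     while n != 0: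
--         diff += sign * (n % 10)
--         sign = -sign
--         n //= 10
--     return diff == 0
-- ===== Notes on version B (the rewrite author's own statement) =====
-- stated objective: alternative
-- what changed: Replaces the recursion carrying (pos, impar, par) by an iterative loop over one signed difference accumulator with an alternating sign, returning diff == 0.
import Mathlib
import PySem

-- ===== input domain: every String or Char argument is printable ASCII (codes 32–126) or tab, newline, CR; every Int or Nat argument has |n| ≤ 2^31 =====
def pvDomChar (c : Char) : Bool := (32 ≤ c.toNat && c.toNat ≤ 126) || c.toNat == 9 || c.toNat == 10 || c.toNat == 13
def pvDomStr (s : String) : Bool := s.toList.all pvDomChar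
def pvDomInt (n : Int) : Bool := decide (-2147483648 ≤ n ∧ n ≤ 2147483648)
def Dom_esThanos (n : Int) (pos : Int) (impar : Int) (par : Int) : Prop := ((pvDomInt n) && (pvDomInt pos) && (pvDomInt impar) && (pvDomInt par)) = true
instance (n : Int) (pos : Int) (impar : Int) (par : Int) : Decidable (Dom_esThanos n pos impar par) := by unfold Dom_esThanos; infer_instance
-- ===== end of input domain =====

-- B replaces A's recursion over (pos, impar, par) by an iterative loop over one
-- signed difference accumulator with an alternating sign (objective: alternative).

-- ===== PORT A =====
def esThanos (n : Int) (pos : Int) (impar : Int) (par : Int) : Bool :=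
  if n = 0 then impar == par
  else if n < 0 then false  -- totality guard: Python recurses forever (RecursionError) here; excluded by Pre_
  else
    let digito := PySem.Int.mod n 10
    if PySem.Int.mod pos 2 == 1 then
      esThanos (PySem.Int.floordiv n 10) (pos + 1) (digito + impar) par
    else
      esThanos (PySem.Int.floordiv n 10) (pos + 1) impar (par + digito)
termination_by n.toNat
decreasing_by
  all_goals rw [PySem.Int.floordiv_eq_ediv_of_pos (by omega : (0:Int) < 10)]; omega

-- ===== PORT B =====
def pvAltLoop (n : Int) (diff : Int) (sign : Int) : Bool :=
  if n = 0 then diff == 0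
  else if n < 0 then false  -- totality guard: Python's while loop never terminates here; excluded by Pre_
  else pvAltLoop (PySem.Int.floordiv n 10) (diff + sign * PySem.Int.mod n 10) (-sign)
termination_by n.toNat
decreasing_by
  rw [PySem.Int.floordiv_eq_ediv_of_pos (by omega : (0:Int) < 10)]; omega

def esThanos_alt (n : Int) (pos : Int) (impar : Int) (par : Int) : Bool :=
  pvAltLoop n (impar - par) (if PySem.Int.mod pos 2 == 1 then 1 else -1)

-- ===== PRECONDITION & SPEC =====
-- On n < 0 both Pythons never return (A raises RecursionError, B's loop spins), so Pre_ excludes them.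
def Pre_esThanos (n : Int) (pos : Int) (impar : Int) (par : Int) : Prop := 0 ≤ n
instance (n : Int) (pos : Int) (impar : Int) (par : Int) : Decidable (Pre_esThanos n pos impar par) := by unfold Pre_esThanos; infer_instance
def pvWitness_esThanos : Int × Int × Int × Int := (123, 1, 0, 0)

def Spec_esThanos (n : Int) (pos : Int) (impar : Int) (par : Int) (out : Bool) : Prop := out = esThanos_alt n pos impar par
instance (n : Int) (pos : Int) (impar : Int) (par : Int) (out : Bool) : Decidable (Spec_esThanos n pos impar par out) := by unfold Spec_esThanos; infer_instance

-- ===== CLAIM (what is proved, stated in full; the proofs are below) =====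
def Claim_equal_esThanos : Prop := ∀ (n : Int) (pos : Int) (impar : Int) (par : Int), Dom_esThanos n pos impar par → Pre_esThanos n pos impar par → Spec_esThanos n pos impar par (esThanos n pos impar par)

-- ===== LEMMAS AND PROOFS =====

lemma pvMod2_cases (pos : Int) : PySem.Int.mod pos 2 = 1 ∨ PySem.Int.mod pos 2 = 0 := by
  rw [PySem.Int.mod_eq_emod_of_pos (by omega : (0:Int) < 2)]; omega

lemma pvMod2_succ_of_one (pos : Int) (h : PySem.Int.mod pos 2 = 1) :
    PySem.Int.mod (pos + 1) 2 = 0 := by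
  rw [PySem.Int.mod_eq_emod_of_pos (by omega : (0:Int) < 2)] at *; omega

lemma pvMod2_succ_of_zero (pos : Int) (h : PySem.Int.mod pos 2 = 0) :
    PySem.Int.mod (pos + 1) 2 = 1 := by
  rw [PySem.Int.mod_eq_emod_of_pos (by omega : (0:Int) < 2)] at *; omega

lemma pvBase (impar par : Int) : (impar == par) = ((impar - par) == 0) := by
  rcases eq_or_ne impar par with h | h <;> simp [h, sub_eq_zero]

lemma pvMainAux : ∀ k : Nat, ∀ n pos impar par : Int, n.toNat = k →
    esThanos n pos impar par =
      pvAltLoop n (impar - par) (if PySem.Int.mod pos 2 == 1 then 1 else -1) := by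
  intro k
  induction k using Nat.strong_induction_on with
  | _ k ih =>
    intro n pos impar par hk
    rw [esThanos, pvAltLoop]
    by_cases h0 : n = 0
    · simp only [h0, if_pos]
      exact pvBase impar par
    · by_cases hn : n < 0
      · simp [h0, hn]
      · have hdec : (PySem.Int.floordiv n 10).toNat < k := by
          rw [PySem.Int.floordiv_eq_ediv_of_pos (by omega : (0:Int) < 10)]; omega
        simp only [if_neg h0, if_neg hn]
        rcases pvMod2_cases pos with h1 | h2
        · have hc : (PySem.Int.mod pos 2 == 1) = true := by rw [h1]; decide
          rw [if_pos hc,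
            ih _ hdec (PySem.Int.floordiv n 10) (pos + 1)
              (PySem.Int.mod n 10 + impar) par rfl,
            pvMod2_succ_of_one pos h1]
          simp only [h1]
          norm_num
          congr 1
          ring
        · have hc : ¬ (PySem.Int.mod pos 2 == 1) = true := by rw [h2]; decide
          rw [if_neg hc,
            ih _ hdec (PySem.Int.floordiv n 10) (pos + 1)
              impar (par + PySem.Int.mod n 10) rfl,
            pvMod2_succ_of_zero pos h2]
          simp only [h2]
          norm_num
          congr 1
          ring

lemma pvMain (n pos impar par : Int) :
    esThanos n pos impar par =
      pvAltLoop n (impar - par) (if PySem.Int.mod pos 2 == 1 then 1 else -1) :=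
  pvMainAux n.toNat n pos impar par rfl

-- ===== VERDICT (by name: the statement is the Claim_ definition above) =====
theorem esThanos_spec : Claim_equal_esThanos := by
  intro n pos impar par _ _
  unfold Spec_esThanos esThanos_alt
  exact pvMain n pos impar par
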